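-- pv_equiv track=rewrite | github.com/baexxbin/Algorithm | Programmers_Python/lv2_방금그곡.py | solution
-- ===== SOURCE A (Python) =====
-- def changeSmall(codes):
--     stack = []
--     for c in codes:
--         if c=='#':
--             cur = stack.pop()
--             stack.append(cur.lower())
--             continue
--         stack.append(c)
--     return ''.join(stack)
--
-- def makeCode(start, end, code):
--     m1, s1 = map(int, start.split(':'))
--     m2, s2 = map(int, end.split(':'))
--
--     playTime = ((m2 * 60) + s2) - ((m1 * 60) + s1)
--
--     playCode = ''
--     ln = len(code)
--     if playTime <= ln:
--         playCode += code[:playTime]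
--     else:
--         q, r = playTime//ln, playTime%ln
--         playCode += code*q+code[:r]
--
--     return playCode, playTime
--
-- def solution(m, musicinfos):
--     # '#'처리를 위해 #이붙은 부분 소문자로 변경
--     m = changeSmall(m)
--
--     # 노래가 재생된 시간만큼 음길이 조절하기
--
--     # 음을 돌면서 m이 들어있는지 확인 (ans배열 삽입)
--     # ans배열이 여러개일 경우 조건에 맞는 제목 반환
--
--     ans = []
--     idx = 0
--     for music in musicinfos:
--         start, end, title, code = music.split(',')
--         code = changeSmall(code)
--         playCode, playTime = makeCode(start, end, code)
--
--         if playCode.find(m) != -1: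
--             ans.append((playTime, idx, title))
--
--     if not ans:
--         return "(None)"
--     else:
--         ans = sorted(ans, key=lambda x: (-x[0], x[1]))
--         return ans[0][-1]
-- ===== SOURCE B (Python) =====
-- def _normalize(s):
--     # a note is flattened (lowercased) iff it is immediately followed by '#';
--     # the '#' characters themselves disappear
--     return ''.join(c.lower() if n == '#' else c
--                    for c, n in zip(s, s[1:] + ' ') if c != '#')
--
--
-- def _seconds(clock):
--     m, s = map(int, clock.split(':'))
--     return m * 60 + s
--
--
-- def solution(m, musicinfos):
--     mm = _normalize(m)
--     best = None  # (playTime, title) of the longest matching music seen so far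
--     for music in musicinfos:
--         start, end, title, code = music.split(',')
--         code = _normalize(code)
--         playTime = _seconds(end) - _seconds(start)
--         if playTime > len(code):
--             code = code * (playTime // len(code) + 1)
--         playCode = code[:playTime]
--         if mm in playCode and (best is None or playTime > best[0]):
--             best = (playTime, title)
--     return "(None)" if best is None else best[1]
-- ===== Notes on version B (the rewrite author's own statement) =====
-- stated objective: simpler
-- what changed: The '#' handling becomes a single zip-with-successor pass (a note is lowercased iff followed by '#') instead of a stack with pop/push, and the selection becomes a one-pass best tracker updating only on strictly longer playTime instead of collecting all matches and sorting by (-playTime, idx).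
import Mathlib
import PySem

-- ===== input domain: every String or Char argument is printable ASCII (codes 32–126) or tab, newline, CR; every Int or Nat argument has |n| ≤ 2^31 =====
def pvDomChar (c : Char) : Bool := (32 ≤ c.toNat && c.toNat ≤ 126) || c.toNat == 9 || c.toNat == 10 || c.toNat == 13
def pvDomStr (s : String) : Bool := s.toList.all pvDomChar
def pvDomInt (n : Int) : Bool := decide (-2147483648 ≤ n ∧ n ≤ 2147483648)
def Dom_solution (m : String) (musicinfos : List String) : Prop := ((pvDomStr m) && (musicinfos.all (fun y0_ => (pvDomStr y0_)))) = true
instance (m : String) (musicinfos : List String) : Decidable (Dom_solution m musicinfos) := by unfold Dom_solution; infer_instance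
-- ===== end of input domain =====

-- B replaces A's stack-based '#' normalisation by a zip-with-successor pass and A's
-- collect-all/sort-by-(-playTime,idx) selection by a single-pass strictly-greater best tracker (objective: simpler).

-- ===== PORT A =====

-- changeSmall: stack loop; '#' pops the top and pushes its lowercase (pop on empty stack = IndexError = none)
def csStepA (st? : Option (List Char)) (c : Char) : Option (List Char) :=
  match st? with
  | none => none
  | some st =>
    if c = '#' then
      match st.getLast? with
      | none => none
      | some cur => some (st.dropLast ++ [PySem.Chars.lowerChar cur])
    else some (st ++ [c])

def changeSmallA (s : String) : Option (List Char) :=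
  s.toList.foldl csStepA (some [])

-- m1, s1 = map(int, start.split(':'))
def clockA? (s : String) : Option (Int × Int) :=
  match PySem.Str.split? s ":" with
  | some [a, b] =>
    match PySem.Int.ofStr? a, PySem.Int.ofStr? b with
    | some x, some y => some (x, y)
    | _, _ => none
  | _ => none

-- makeCode(start, end, code); code*q ported by hand as replicate/flatten (exact: Python str*int, negative = empty)
def makeCodeA (start : String) (end_ : String) (code : List Char) : Option (List Char × Int) :=
  match clockA? start, clockA? end_ with
  | some (m1, s1), some (m2, s2) =>
    let playTime := ((m2 * 60) + s2) - ((m1 * 60) + s1)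
    let ln : Int := (code.length : Int)
    if playTime ≤ ln then
      some (PySem.List.slice code none (some playTime), playTime)
    else
      match PySem.Int.divmod? playTime ln with
      | none => none  -- ZeroDivisionError
      | some (q, r) =>
        some ((List.replicate q.toNat code).flatten ++ PySem.List.slice code none (some r), playTime)
  | _, _ => none

-- loop body of A's solution; idx is initialised to 0 and never incremented in A, so every entry carries idx 0
def stepA (mn : List Char) (acc? : Option (List (Int × Int × String))) (music : String) :
    Option (List (Int × Int × String)) :=
  match acc? with
  | none => none
  | some acc =>
    match PySem.Str.split? music "," with
    | some [start, end_, title, code] =>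
      match changeSmallA code with
      | none => none
      | some code' =>
        match makeCodeA start end_ code' with
        | none => none
        | some (playCode, playTime) =>
          if PySem.Chars.find playCode mn ≠ -1 then some (acc ++ [(playTime, 0, title)])
          else some acc
    | _ => none  -- unpacking 'start, end, title, code = …' raises unless exactly 4 fields

def solution (m : String) (musicinfos : List String) : String :=
  match changeSmallA m with
  | none => "(None)"  -- A raises IndexError here; outside Pre_
  | some mn =>
    match musicinfos.foldl (stepA mn) (some []) with
    | none => "(None)"  -- A raises inside the loop; outside Pre_
    | some ans =>
      if ans.isEmpty then "(None)"
      else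
        match PySem.List.sorted2 ans (fun x => -x.1) (fun x => x.2.1) with
        | [] => "(None)"  -- unreachable: sorted of a nonempty list
        | x :: _ => x.2.2

-- ===== PORT B =====

-- ''.join of one-char strings over the generator = the mapped/filtered char list itself
def normB (s : String) : List Char :=
  ((s.toList.zip (s.toList.drop 1 ++ [' '])).filter (fun p => p.1 ≠ '#')).map
    (fun p => if p.2 = '#' then PySem.Chars.lowerChar p.1 else p.1)

-- _seconds(clock): total seconds, or none where int()/unpacking raises
def clockB? (s : String) : Option Int :=
  match PySem.Str.split? s ":" with
  | some [a, b] =>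
    match PySem.Int.ofStr? a, PySem.Int.ofStr? b with
    | some x, some y => some (x * 60 + y)
    | _, _ => none
  | _ => none

-- loop body of B's solution: update best only on a strictly longer matching music
def stepB (mn : List Char) (acc? : Option (Option (Int × String))) (music : String) :
    Option (Option (Int × String)) :=
  match acc? with
  | none => none
  | some best =>
    match PySem.Str.split? music "," with
    | some [start, end_, title, code0] =>
      let code := normB code0
      match clockB? end_, clockB? start with
      | some tEnd, some tStart =>
        let playTime := tEnd - tStart
        let codeX? : Option (List Char) :=
          if playTime > (code.length : Int) then
            match PySem.Int.divmod? playTime (code.length : Int) with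
            | none => none  -- ZeroDivisionError
            | some (q, _) => some ((List.replicate (q + 1).toNat code).flatten)
          else some code
        match codeX? with
        | none => none
        | some codeX =>
          let playCode := PySem.List.slice codeX none (some playTime)
          if PySem.Chars.isIn mn playCode &&
              (match best with | none => true | some b => decide (b.1 < playTime)) then
            some (some (playTime, title))
          else some best
      | _, _ => none
    | _ => none

def solution_alt (m : String) (musicinfos : List String) : String :=
  let mn := normB m
  match musicinfos.foldl (stepB mn) (some none) with
  | none => "(None)"
  | some none => "(None)"
  | some (some b) => b.2

-- ===== PRECONDITION & SPEC =====

-- Pre_'s own closed-form parse of a clock string (shape check only)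
def prClock (s : String) : Bool :=
  match PySem.Str.split? s ":" with
  | some [a, b] => (PySem.Int.ofStr? a).isSome && (PySem.Int.ofStr? b).isSome
  | _ => false

def prTime (s : String) : Int :=
  match PySem.Str.split? s ":" with
  | some [a, b] =>
    match PySem.Int.ofStr? a, PySem.Int.ofStr? b with
    | some x, some y => x * 60 + y
    | _, _ => 0
  | _ => 0

-- each entry must split into exactly 4 comma fields, both clocks must parse as int:int, and the
-- melody code must keep a note after dropping '#'s unless the played time is ≤ 0 (else ZeroDivisionError)
def prOk (music : String) : Bool :=
  match PySem.Str.split? music "," with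
  | some [start, end_, _, code] =>
    prClock start && prClock end_ &&
      (code.toList.any (fun c => c ≠ '#') || decide (prTime end_ - prTime start ≤ 0))
  | _ => false

-- a melody string starting with '#' makes A pop an empty stack (IndexError)
def prCodeHashFree (music : String) : Bool :=
  match PySem.Str.split? music "," with
  | some [_, _, _, code] => code.toList.head? != some '#'
  | _ => true

-- Pre_ excludes exactly the inputs on which A raises: a melody (m or a code field) starting with '#',
-- a malformed entry or clock, and an empty normalised code with positive play time.
def Pre_solution (m : String) (musicinfos : List String) : Prop :=
  ((m.toList.head? != some '#') &&
    musicinfos.all (fun music => prOk music && prCodeHashFree music)) = true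
instance (m : String) (musicinfos : List String) : Decidable (Pre_solution m musicinfos) := by
  unfold Pre_solution; infer_instance

def pvWitness_solution : String × List String := ("ABC", ["0:00,0:08,tune,ABCD"])

def Spec_solution (m : String) (musicinfos : List String) (out : String) : Prop :=
  out = solution_alt m musicinfos
instance (m : String) (musicinfos : List String) (out : String) : Decidable (Spec_solution m musicinfos out) := by
  unfold Spec_solution; infer_instance

-- ===== CLAIM (what is proved, stated in full; the proofs are below) =====
def Claim_equal_solution : Prop := ∀ (m : String) (musicinfos : List String), Dom_solution m musicinfos → Pre_solution m musicinfos → Spec_solution m musicinfos (solution m musicinfos)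

-- ===== LEMMAS AND PROOFS =====

theorem charOfNat_toNat (n : Nat) (h : n < 55296) : (Char.ofNat n).toNat = n := by
  have hv : n.isValidChar := Or.inl h
  rw [Char.ofNat, dif_pos hv]
  show (UInt32.ofNatLT n _).toBitVec.toNat = n
  simp

theorem lowerChar_idem (c : Char) :
    PySem.Chars.lowerChar (PySem.Chars.lowerChar c) = PySem.Chars.lowerChar c := by
  unfold PySem.Chars.lowerChar PySem.Chars.isupper
  by_cases hA : 'A' ≤ c <;> by_cases hZ : c ≤ 'Z' <;> simp [hA, hZ]
  have h1 : 65 ≤ c.toNat := Fin.mk_le_mk.mp hA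
  have h2 : c.toNat ≤ 90 := Fin.mk_le_mk.mp hZ
  have hX : (Char.ofNat (c.toNat + 32)).toNat = c.toNat + 32 := charOfNat_toNat _ (by omega)
  have hno : ¬ (Char.ofNat (c.toNat + 32) ≤ 'Z') := by
    intro hcon
    have h3 : (Char.ofNat (c.toNat + 32)).toNat ≤ 90 := Fin.mk_le_mk.mp hcon
    rw [hX] at h3
    omega
  simp [hno]

-- the recursion behind B's zip-with-successor pass
def norm2 : List Char → List Char
  | [] => []
  | c :: rest =>
    if c = '#' then norm2 rest
    else (if rest.head? = some '#' then PySem.Chars.lowerChar c else c) :: norm2 rest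

theorem zfm_eq_norm2 (cs : List Char) :
    ((cs.zip (cs.drop 1 ++ [' '])).filter (fun p => p.1 ≠ '#')).map
      (fun p => if p.2 = '#' then PySem.Chars.lowerChar p.1 else p.1) = norm2 cs := by
  induction cs with
  | nil => rfl
  | cons c rest ih =>
    cases rest with
    | nil => by_cases hc : c = '#' <;> simp [norm2, hc]
    | cons d r2 =>
      simp only [List.drop_succ_cons, List.drop_zero] at ih
      simp at ih
      by_cases hc : c = '#' <;> simp [norm2, hc, ih]

theorem normB_eq_norm2 (s : String) : normB s = norm2 s.toList := by
  simpa [normB] using zfm_eq_norm2 s.toList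

theorem norm2_eq_nil_iff (cs : List Char) : norm2 cs = [] ↔ cs.all (fun c => c = '#') := by
  induction cs with
  | nil => simp [norm2]
  | cons c rest ih => by_cases hc : c = '#' <;> simp [norm2, hc, ih]

-- what A's stack loop computes once the stack is nonempty
def hashApply : Char → List Char → List Char
  | l, [] => [l]
  | l, c :: rest => if c = '#' then hashApply (PySem.Chars.lowerChar l) rest else l :: hashApply c rest

theorem foldl_csStepA (cs : List Char) : ∀ (st : List Char) (l : Char),
    cs.foldl csStepA (some (st ++ [l])) = some (st ++ hashApply l cs) := by
  induction cs with
  | nil => intro st l; simp [hashApply]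
  | cons c rest ih =>
    intro st l
    by_cases hc : c = '#'
    · subst hc
      have hstep : csStepA (some (st ++ [l])) '#' = some (st ++ [PySem.Chars.lowerChar l]) := by
        simp [csStepA]
      rw [List.foldl_cons, hstep, ih st (PySem.Chars.lowerChar l)]
      simp [hashApply]
    · have hstep : csStepA (some (st ++ [l])) c = some ((st ++ [l]) ++ [c]) := by
        simp [csStepA, hc]
      rw [List.foldl_cons, hstep, ih (st ++ [l]) c]
      simp [hashApply, hc]

theorem hashApply_eq (cs : List Char) : ∀ l : Char,
    hashApply l cs = (if cs.head? = some '#' then PySem.Chars.lowerChar l else l) :: norm2 cs := by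
  induction cs with
  | nil => intro l; simp [hashApply, norm2]
  | cons c rest ih =>
    intro l
    by_cases hc : c = '#'
    · subst hc
      rw [show hashApply l ('#' :: rest) = hashApply (PySem.Chars.lowerChar l) rest from by
        simp [hashApply]]
      rw [ih (PySem.Chars.lowerChar l)]
      by_cases hr : rest.head? = some '#' <;> simp [hr, norm2, lowerChar_idem]
    · rw [show hashApply l (c :: rest) = l :: hashApply c rest from by simp [hashApply, hc]]
      rw [ih c]
      simp [norm2, hc]

theorem changeSmallA_eq (cs : List Char) (h : cs.head? ≠ some '#') :
    cs.foldl csStepA (some []) = some (norm2 cs) := by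
  cases cs with
  | nil => rfl
  | cons c rest =>
    have hc : c ≠ '#' := by intro hcc; exact h (by simp [hcc])
    have hstep : csStepA (some []) c = some ([] ++ [c]) := by simp [csStepA, hc]
    rw [List.foldl_cons, hstep, foldl_csStepA rest [] c, hashApply_eq]
    simp [norm2, hc]

theorem changeSmallA_eq' (s : String) (h : s.toList.head? ≠ some '#') :
    changeSmallA s = some (norm2 s.toList) := changeSmallA_eq s.toList h

-- selection: B's running best over A's ans list
def pickStep (best : Option (Int × String)) (x : Int × Int × String) : Option (Int × String) :=
  match best with
  | none => some (x.1, x.2.2)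
  | some b => if b.1 < x.1 then some (x.1, x.2.2) else some b

theorem clock_extract (s : String) (h : prClock s = true) :
    ∃ x y, clockA? s = some (x, y) ∧ clockB? s = some (x * 60 + y) ∧ prTime s = x * 60 + y := by
  unfold prClock at h
  split at h
  · rename_i a b heq
    cases hx : PySem.Int.ofStr? a with
    | none => rw [hx] at h; simp at h
    | some x =>
      cases hy : PySem.Int.ofStr? b with
      | none => rw [hx, hy] at h; simp at h
      | some y =>
        exact ⟨x, y, by simp [clockA?, heq, hx, hy], by simp [clockB?, heq, hx, hy],
          by simp [prTime, heq, hx, hy]⟩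
  · simp at h

theorem flatten_replicate_length {α : Type} (n : Nat) (cl : List α) :
    ((List.replicate n cl).flatten).length = n * cl.length := by
  simp [List.length_flatten, List.map_replicate, List.sum_replicate, smul_eq_mul]

theorem cyc_eq (cl : List Char) (pt : Int) (hl : 0 < (cl.length : Int))
    (hgt : (cl.length : Int) < pt) :
    PySem.List.slice ((List.replicate (pt.fdiv (cl.length : Int) + 1).toNat cl).flatten) none (some pt)
      = (List.replicate (pt.fdiv (cl.length : Int)).toNat cl).flatten ++
          PySem.List.slice cl none (some (pt.fmod (cl.length : Int))) := by
  have hq0 : 0 ≤ pt.fdiv (cl.length : Int) := Int.fdiv_nonneg (by omega) (by omega)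
  have hr0 : 0 ≤ pt.fmod (cl.length : Int) := Int.fmod_nonneg_of_pos pt hl
  have hrlt : pt.fmod (cl.length : Int) < (cl.length : Int) := Int.fmod_lt_of_pos pt hl
  have hs1 := PySem.List.slice_to
    (xs := (List.replicate (pt.fdiv (cl.length : Int) + 1).toNat cl).flatten) (b := pt)
    (by omega)
  have hs2 := PySem.List.slice_to (xs := cl) (b := pt.fmod (cl.length : Int)) hr0
  rw [hs1, hs2]
  have hq1 : (pt.fdiv (cl.length : Int) + 1).toNat = (pt.fdiv (cl.length : Int)).toNat + 1 := by
    omega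
  rw [hq1, List.replicate_succ', List.flatten_append]
  have hid := Int.mul_fdiv_add_fmod pt (cl.length : Int)
  have hqc : ((pt.fdiv (cl.length : Int)).toNat : Int) = pt.fdiv (cl.length : Int) :=
    Int.toNat_of_nonneg hq0
  have hpt : pt.toNat = (pt.fdiv (cl.length : Int)).toNat * cl.length + (pt.fmod (cl.length : Int)).toNat := by
    have hcast : ((pt.fdiv (cl.length : Int)).toNat * cl.length : Int) =
        (cl.length : Int) * pt.fdiv (cl.length : Int) := by push_cast [hqc]; ring
    omega
  rw [hpt, ← flatten_replicate_length (pt.fdiv (cl.length : Int)).toNat cl,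
    show ([cl] : List (List Char)).flatten = cl from by simp]
  exact List.take_length_add_append _

theorem per_music (mn : List Char) (music : String)
    (hok : prOk music = true) (hhf : prCodeHashFree music = true) :
    ∃ e : List (Int × Int × String),
      (∀ x ∈ e, x.2.1 = 0) ∧
      (∀ acc, stepA mn (some acc) music = some (acc ++ e)) ∧
      (∀ best, stepB mn (some best) music = some (e.foldl pickStep best)) := by
  unfold prOk at hok
  split at hok
  case _ start end_ ti code heq =>
    unfold prCodeHashFree at hhf
    rw [heq] at hhf
    simp at hhf
    rw [Bool.and_eq_true, Bool.and_eq_true] at hok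
    obtain ⟨⟨hcl1, hcl2⟩, hln⟩ := hok
    obtain ⟨x1, y1, hA1, hB1, hT1⟩ := clock_extract start hcl1
    obtain ⟨x2, y2, hA2, hB2, hT2⟩ := clock_extract end_ hcl2
    rw [hT1, hT2] at hln
    have hcs : changeSmallA code = some (norm2 code.toList) := changeSmallA_eq' code hhf
    have hnb : normB code = norm2 code.toList := normB_eq_norm2 code
    have hfi : ∀ playCode : List Char,
        (PySem.Chars.find playCode mn ≠ -1 ↔ PySem.Chars.isIn mn playCode = true) := by
      intro playCode
      rw [PySem.Chars.isIn_iff_infix, Ne, PySem.Chars.find_eq_neg_one_iff]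
      exact not_not
    by_cases hle :
        (x2 * 60 + y2) - (x1 * 60 + y1) ≤ (((norm2 code.toList).length : Nat) : Int)
    · -- playTime ≤ ln: both take code[:playTime]
      have hmk : makeCodeA start end_ (norm2 code.toList) =
          some (PySem.List.slice (norm2 code.toList) none
                  (some ((x2 * 60 + y2) - (x1 * 60 + y1))),
                (x2 * 60 + y2) - (x1 * 60 + y1)) := by
        unfold makeCodeA
        rw [hA1, hA2]
        simp only [if_pos hle]
      by_cases hin : PySem.Chars.isIn mn
          (PySem.List.slice (norm2 code.toList) none
            (some ((x2 * 60 + y2) - (x1 * 60 + y1)))) = true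
      · refine ⟨[((x2 * 60 + y2) - (x1 * 60 + y1), 0, ti)], by simp, ?_, ?_⟩
        · intro acc
          simp only [stepA, heq, hcs, hmk, if_pos ((hfi _).mpr hin)]
        · intro best
          simp only [stepB, heq, hB1, hB2, hnb, not_lt.mpr hle, if_neg (not_lt.mpr hle),
            gt_iff_lt]
          cases best with
          | none => simp [pickStep, hin]
          | some b =>
            by_cases hlt : b.1 < (x2 * 60 + y2) - (x1 * 60 + y1) <;>
              simp [pickStep, hin, hlt]
      · refine ⟨[], by simp, ?_, ?_⟩
        · intro acc
          simp only [stepA, heq, hcs, hmk,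
            if_neg (fun hcon => hin ((hfi _).mp hcon))]
          simp
        · intro best
          simp only [stepB, heq, hB1, hB2, hnb, if_neg (not_lt.mpr hle), gt_iff_lt]
          simp [hin]
    · -- playTime > ln: A takes code*q + code[:r], B slices code*(q+1) to playTime
      push_neg at hle
      have hlpos : 0 < (((norm2 code.toList).length : Nat) : Int) := by
        simp only [Bool.or_eq_true, List.any_eq_true, decide_eq_true_eq] at hln
        rcases hln with hany | hle0
        · have hne : norm2 code.toList ≠ [] := by
            rw [Ne, norm2_eq_nil_iff]
            intro hall
            simp only [List.all_eq_true, decide_eq_true_eq] at hall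
            obtain ⟨c, hc1, hc2⟩ := hany
            exact hc2 (hall c hc1)
          have := List.length_pos_iff.mpr hne
          exact_mod_cast this
        · exfalso
          have h0 : (0 : Int) ≤ (((norm2 code.toList).length : Nat) : Int) := by positivity
          omega
      have hne0 : ¬ ((((norm2 code.toList).length : Nat) : Int) = 0) := by omega
      have hdm : PySem.Int.divmod? ((x2 * 60 + y2) - (x1 * 60 + y1))
          (((norm2 code.toList).length : Nat) : Int) =
          some (((x2 * 60 + y2) - (x1 * 60 + y1)).fdiv (((norm2 code.toList).length : Nat) : Int),
                ((x2 * 60 + y2) - (x1 * 60 + y1)).fmod (((norm2 code.toList).length : Nat) : Int)) := by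
        simp only [PySem.Int.divmod?, if_neg hne0]
      have hBpc := cyc_eq (norm2 code.toList) ((x2 * 60 + y2) - (x1 * 60 + y1)) hlpos hle
      have hmk : makeCodeA start end_ (norm2 code.toList) =
          some ((List.replicate (((x2 * 60 + y2) - (x1 * 60 + y1)).fdiv
                    (((norm2 code.toList).length : Nat) : Int)).toNat (norm2 code.toList)).flatten ++
                  PySem.List.slice (norm2 code.toList) none
                    (some (((x2 * 60 + y2) - (x1 * 60 + y1)).fmod
                      (((norm2 code.toList).length : Nat) : Int))),
                (x2 * 60 + y2) - (x1 * 60 + y1)) := by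
        unfold makeCodeA
        rw [hA1, hA2]
        simp only [if_neg (not_le.mpr hle), hdm]
      by_cases hin : PySem.Chars.isIn mn
          ((List.replicate (((x2 * 60 + y2) - (x1 * 60 + y1)).fdiv
              (((norm2 code.toList).length : Nat) : Int)).toNat (norm2 code.toList)).flatten ++
            PySem.List.slice (norm2 code.toList) none
              (some (((x2 * 60 + y2) - (x1 * 60 + y1)).fmod
                (((norm2 code.toList).length : Nat) : Int)))) = true
      · refine ⟨[((x2 * 60 + y2) - (x1 * 60 + y1), 0, ti)], by simp, ?_, ?_⟩
        · intro acc
          simp only [stepA, heq, hcs, hmk, if_pos ((hfi _).mpr hin)]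
        · intro best
          simp only [stepB, heq, hB1, hB2, hnb, if_pos hle, gt_iff_lt, hdm, hBpc]
          cases best with
          | none => simp [pickStep, hin]
          | some b =>
            by_cases hlt : b.1 < (x2 * 60 + y2) - (x1 * 60 + y1) <;>
              simp [pickStep, hin, hlt]
      · refine ⟨[], by simp, ?_, ?_⟩
        · intro acc
          simp only [stepA, heq, hcs, hmk,
            if_neg (fun hcon => hin ((hfi _).mp hcon))]
          simp
        · intro best
          simp only [stepB, heq, hB1, hB2, hnb, if_pos hle, gt_iff_lt, hdm, hBpc]
          simp [hin]
  case _ =>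
    simp at hok

theorem main_loop (mn : List Char) (musics : List String)
    (h : ∀ mu ∈ musics, (prOk mu && prCodeHashFree mu) = true) :
    ∀ acc best, ∃ rest : List (Int × Int × String),
      (∀ x ∈ rest, x.2.1 = 0) ∧
      musics.foldl (stepA mn) (some acc) = some (acc ++ rest) ∧
      musics.foldl (stepB mn) (some best) = some (rest.foldl pickStep best) := by
  revert h
  induction musics with
  | nil => intro h acc best; exact ⟨[], by simp, by simp, by simp⟩
  | cons mu ms ih =>
    intro h acc best
    have hmu := h mu (by simp)
    rw [Bool.and_eq_true] at hmu
    obtain ⟨e, he0, hsa, hsb⟩ := per_music mn mu hmu.1 hmu.2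
    obtain ⟨rest, hr0, hra, hrb⟩ :=
      ih (fun x hx => h x (by simp [hx])) (acc ++ e) (e.foldl pickStep best)
    refine ⟨e ++ rest, ?_, ?_, ?_⟩
    · intro x hx
      rcases List.mem_append.mp hx with h1 | h2
      exacts [he0 x h1, hr0 x h2]
    · rw [List.foldl_cons, hsa acc, hra, List.append_assoc]
    · rw [List.foldl_cons, hsb best, hrb, List.foldl_append]

-- strict-key insertion predicate behind Python's stable sort with key -playTime
def bef1 (a b : Int × Int × String) : Bool := decide ((-a.1 : Int) < -b.1)

theorem insertBy_congr {α : Type} (p q : α → α → Bool) (x : α) (ys : List α)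
    (h : ∀ y ∈ ys, p x y = q x y) :
    PySem.List.insertBy p x ys = PySem.List.insertBy q x ys := by
  induction ys with
  | nil => rfl
  | cons y ys ih =>
    simp only [PySem.List.insertBy, h y (by simp)]
    split
    · rfl
    · rw [ih (fun z hz => h z (by simp [hz]))]

theorem sorted2_eq_foldl (ans : List (Int × Int × String)) (hz : ∀ x ∈ ans, x.2.1 = 0) :
    PySem.List.sorted2 ans (fun y => (-y.1 : Int)) (fun y => y.2.1) =
      ans.foldl (fun acc x => PySem.List.insertBy bef1 x acc) [] := by
  unfold PySem.List.sorted2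
  simp only [if_neg (by simp : ¬ (false = true))]
  suffices hgen : ∀ (l acc : List (Int × Int × String)), (∀ x ∈ l, x.2.1 = 0) →
      (∀ x ∈ acc, x.2.1 = 0) →
      l.foldl (fun acc x => PySem.List.insertBy
        (fun a b => decide ((-a.1 : Int) < -b.1) ||
          (!decide ((-b.1 : Int) < -a.1) && decide (a.2.1 < b.2.1))) x acc) acc =
      l.foldl (fun acc x => PySem.List.insertBy bef1 x acc) acc by
    exact hgen ans [] hz (by simp)
  intro l
  induction l with
  | nil => intro acc _ _; rfl
  | cons x xs ih =>
    intro acc hl hacc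
    simp only [List.foldl_cons]
    have hstep : PySem.List.insertBy
        (fun a b => decide ((-a.1 : Int) < -b.1) ||
          (!decide ((-b.1 : Int) < -a.1) && decide (a.2.1 < b.2.1))) x acc =
        PySem.List.insertBy bef1 x acc := by
      apply insertBy_congr
      intro y hy
      have h1 : x.2.1 = 0 := hl x (by simp)
      have h2 : y.2.1 = 0 := hacc y hy
      simp [bef1, h1, h2]
    rw [hstep]
    refine ih _ (fun z hz => hl z (by simp [hz])) ?_
    intro z hzm
    rcases (PySem.List.insertBy_mem_iff _ _ _ _).mp hzm with h1 | h2
    · rw [h1]; exact hl x (by simp)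
    · exact hacc z h2
  
theorem sel_core (ans : List (Int × Int × String)) :
    (ans.foldl pickStep none = none → ans = []) ∧
    (∀ b, ans.foldl pickStep none = some b →
      ∃ x t, ans.foldl (fun acc x => PySem.List.insertBy bef1 x acc) [] = x :: t ∧
        x.1 = b.1 ∧ x.2.2 = b.2) := by
  induction ans using List.reverseRecOn with
  | nil => exact ⟨fun _ => rfl, by simp⟩
  | append_singleton ans x ih =>
    rw [List.foldl_append, List.foldl_append]
    cases hfa : ans.foldl pickStep none with
    | none =>
      have hnil : ans = [] := ih.1 hfa
      subst hnil
      refine ⟨by simp [pickStep], ?_⟩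
      intro b hb
      simp only [List.foldl_cons, List.foldl_nil, pickStep, Option.some.injEq] at hb
      exact ⟨x, [], by simp [PySem.List.insertBy], by rw [← hb], by rw [← hb]⟩
    | some b =>
      obtain ⟨hx, t, heq, h1, h2⟩ := ih.2 b hfa
      refine ⟨?_, ?_⟩
      · intro hcon
        simp only [List.foldl_cons, List.foldl_nil, pickStep] at hcon
        split at hcon <;> simp at hcon
      · intro b' hb'
        simp only [List.foldl_cons, List.foldl_nil, pickStep] at hb'
        simp only [List.foldl_nil, heq]
        by_cases hlt : b.1 < x.1
        · rw [if_pos hlt, Option.some.injEq] at hb'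
          have hbx : bef1 x hx = true := by
            simp only [bef1, decide_eq_true_eq]
            omega
          refine ⟨x, hx :: t, ?_, ?_, ?_⟩
          · simp [PySem.List.insertBy, hbx]
          · rw [← hb']
          · rw [← hb']
        · rw [if_neg hlt, Option.some.injEq] at hb'
          have hbx : bef1 x hx = false := by
            simp only [bef1, decide_eq_false_iff_not]
            omega
          refine ⟨hx, PySem.List.insertBy bef1 x t, ?_, ?_, ?_⟩
          · simp [PySem.List.insertBy, hbx]
          · rw [← hb']; exact h1
          · rw [← hb']; exact h2

theorem select_eq (ans : List (Int × Int × String)) (hz : ∀ x ∈ ans, x.2.1 = 0) :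
    (ans.foldl pickStep none = none → ans = []) ∧
    (∀ b, ans.foldl pickStep none = some b →
      ∃ x t, PySem.List.sorted2 ans (fun y => (-y.1 : Int)) (fun y => y.2.1) = x :: t ∧
        x.1 = b.1 ∧ x.2.2 = b.2) := by
  rw [sorted2_eq_foldl ans hz]
  exact sel_core ans

-- ===== VERDICT (by name: the statement is the Claim_ definition above) =====
theorem solution_spec : Claim_equal_solution := by
  intro m musicinfos hdom hpre
  unfold Spec_solution
  unfold Pre_solution at hpre
  rw [Bool.and_eq_true] at hpre
  obtain ⟨hm, hall⟩ := hpre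
  have hm' : m.toList.head? ≠ some '#' := by simpa using hm
  have hcs := changeSmallA_eq' m hm'
  have hall' : ∀ mu ∈ musicinfos, (prOk mu && prCodeHashFree mu) = true :=
    List.all_eq_true.mp hall
  obtain ⟨rest, hr0, hra, hrb⟩ := main_loop (norm2 m.toList) musicinfos hall' [] none
  rw [List.nil_append] at hra
  obtain ⟨hsel1, hsel2⟩ := select_eq rest hr0
  simp only [solution, solution_alt, hcs, normB_eq_norm2 m, hra, hrb]
  cases hpk : rest.foldl pickStep none with
  | none =>
    have hnil : rest = [] := hsel1 hpk
    subst hnil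
    simp
  | some b =>
    obtain ⟨x, t, hst, h1, h2⟩ := hsel2 b hpk
    have hne : rest ≠ [] := by
      intro hcon
      rw [hcon] at hpk
      simp at hpk
    simp [hst, hne, h2]
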